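-- pv_equiv track=rewrite | github.com/chencheng1203/DeLF-pytorch | match/match.py | make_index_table
-- ===== SOURCE A (Python) =====
-- def make_index_table(descriptors_list):
--     """get image index for every feature
--     """
--     des_from_img = {}
--     img_from_des = {}
--     cnt = 0
--     for i_img, des_list in enumerate(descriptors_list):
--         i_des_range = range(cnt, cnt+len(des_list))
--         des_from_img[i_img] = list(i_des_range)
--         for i_des in i_des_range:
--             img_from_des[i_des] = i_img
--
--         cnt+=len(des_list)
--     return des_from_img, img_from_des
-- ===== SOURCE B (Python) =====
-- def make_index_table(descriptors_list):
--     """get image index for every feature"""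
--     lengths = [len(d) for d in descriptors_list]
--     offsets = [0]
--     for n in lengths:
--         offsets.append(offsets[-1] + n)
--     ranges = [list(range(a, b)) for a, b in zip(offsets, offsets[1:])]
--     des_from_img = dict(enumerate(ranges))
--     img_from_des = dict(enumerate(i for i, r in enumerate(ranges) for _ in r))
--     return des_from_img, img_from_des
-- ===== Notes on version B (the rewrite author's own statement) =====
-- stated objective: alternative
-- what changed: Replaces A's single interleaved pass with a running counter and nested per-feature dict writes by an offset-table-first decomposition: prefix-sum offsets, ranges from zipped consecutive offsets, then the two tables built independently via dict(enumerate(...)) and a flattening generator.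
import Mathlib
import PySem

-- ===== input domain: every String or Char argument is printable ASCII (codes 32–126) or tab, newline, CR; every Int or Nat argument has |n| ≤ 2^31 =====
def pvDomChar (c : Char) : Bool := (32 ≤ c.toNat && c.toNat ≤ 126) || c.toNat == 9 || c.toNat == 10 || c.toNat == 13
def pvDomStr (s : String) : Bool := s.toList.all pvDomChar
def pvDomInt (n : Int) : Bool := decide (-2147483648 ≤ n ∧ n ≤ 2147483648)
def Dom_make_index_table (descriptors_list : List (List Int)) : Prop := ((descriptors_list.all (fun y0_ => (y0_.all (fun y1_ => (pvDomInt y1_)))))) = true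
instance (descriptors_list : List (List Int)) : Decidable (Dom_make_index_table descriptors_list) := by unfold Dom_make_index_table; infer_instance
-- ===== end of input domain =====

-- B rebuilds the same two tables by a different decomposition: prefix-sum offset table first,
-- ranges from zipped consecutive offsets, then each table independently (objective: alternative).


-- ===== PORT A =====
-- loop body of A's 'for i_img, des_list in enumerate(descriptors_list)'; state = (des_from_img, img_from_des, cnt)
def pvStepA (st : PySem.Dict Int (List Int) × PySem.Dict Int Int × Int) (p : Int × List Int) :
    PySem.Dict Int (List Int) × PySem.Dict Int Int × Int :=
  let i_des_range := PySem.List.pyRange st.2.2 (st.2.2 + (p.2.length : Int)) 1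
  (st.1.insert p.1 i_des_range,
   i_des_range.foldl (fun d i_des => d.insert i_des p.1) st.2.1,
   st.2.2 + (p.2.length : Int))

def make_index_table (descriptors_list : List (List Int)) :
    (List (Int × List Int)) × (List (Int × Int)) :=
  let final := (PySem.List.enumerate descriptors_list 0).foldl pvStepA
    (PySem.Dict.empty, PySem.Dict.empty, 0)
  (final.1.items, final.2.1.items)

-- ===== PORT B =====
def make_index_table_alt (descriptors_list : List (List Int)) :
    (List (Int × List Int)) × (List (Int × Int)) :=
  let lengths : List Int := descriptors_list.map (fun d => (d.length : Int))
  -- offsets = [0]; for n in lengths: offsets.append(offsets[-1] + n)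
  let offsets : List Int :=
    lengths.foldl (fun acc n => acc ++ [((PySem.List.pyGet? acc (-1)).getD 0) + n]) [0]
  -- ranges = [list(range(a, b)) for a, b in zip(offsets, offsets[1:])]
  let ranges : List (List Int) :=
    (offsets.zip (PySem.List.slice offsets (some 1) none)).map
      (fun p => PySem.List.pyRange p.1 p.2 1)
  -- des_from_img = dict(enumerate(ranges)) : distinct keys 0..n-1, so the dict is the enumerated list
  let des_from_img := PySem.List.enumerate ranges 0
  -- img_from_des = dict(enumerate(i for i, r in enumerate(ranges) for _ in r)) : distinct keys 0..total-1
  let img_from_des :=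
    PySem.List.enumerate ((PySem.List.enumerate ranges 0).flatMap
      (fun p => p.2.map (fun _ => p.1))) 0
  (des_from_img, img_from_des)

-- ===== PRECONDITION & SPEC =====
def Spec_make_index_table (descriptors_list : List (List Int)) (out : (List (Int × List Int)) × (List (Int × Int))) : Prop := out = make_index_table_alt descriptors_list
instance (descriptors_list : List (List Int)) (out : (List (Int × List Int)) × (List (Int × Int))) : Decidable (Spec_make_index_table descriptors_list out) := by unfold Spec_make_index_table; infer_instance

-- ===== CLAIM (what is proved, stated in full; the proofs are below) =====
def Claim_equal_make_index_table : Prop := ∀ (descriptors_list : List (List Int)), Dom_make_index_table descriptors_list → Spec_make_index_table descriptors_list (make_index_table descriptors_list)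

-- ===== LEMMAS AND PROOFS =====

def pvTbl1 : Int → Int → List (List Int) → List (Int × List Int)
  | _, _, [] => []
  | s, cnt, d :: rest =>
      (s, PySem.List.pyRange cnt (cnt + (d.length : Int)) 1) :: pvTbl1 (s + 1) (cnt + (d.length : Int)) rest

def pvTbl2 : Int → Int → List (List Int) → List (Int × Int)
  | _, _, [] => []
  | s, cnt, d :: rest =>
      (PySem.List.pyRange cnt (cnt + (d.length : Int)) 1).map (fun i => (i, s)) ++
        pvTbl2 (s + 1) (cnt + (d.length : Int)) rest

def pvOffs : Int → List Int → List Int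
  | _, [] => []
  | c, n :: rest => (c + n) :: pvOffs (c + n) rest

lemma pvGetLast (xs : List Int) (h : xs ≠ []) : PySem.List.pyGet? xs (-1) = xs.getLast? := by
  have hl : 1 ≤ xs.length := List.length_pos_iff.mpr h
  simp [PySem.List.pyGet?, PySem.List.pyIdx?, List.getLast?_eq_getElem?, hl]

lemma pvB_offsets (l : List Int) : ∀ (acc : List Int) (c : Int), acc.getLast? = some c →
    l.foldl (fun acc n => acc ++ [((PySem.List.pyGet? acc (-1)).getD 0) + n]) acc = acc ++ pvOffs c l := by
  induction l with
  | nil => intro acc c h; simp [pvOffs]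
  | cons n rest ih =>
    intro acc c h
    have hne : acc ≠ [] := by rintro rfl; simp at h
    have hget : PySem.List.pyGet? acc (-1) = some c := by rw [pvGetLast acc hne, h]
    simp only [List.foldl_cons, hget, Option.getD_some]
    rw [ih (acc ++ [c + n]) (c + n) (by simp)]
    simp [pvOffs]

lemma pvEnum_const {α β : Type} (xs : List α) : ∀ (k : Int) (v : β),
    PySem.List.enumerate (xs.map (fun _ => v)) k =
      (PySem.List.pyRange k (k + (xs.length : Int)) 1).map (fun i => (i, v)) := by
  induction xs with
  | nil => intro k v; simp [PySem.List.pyRange_one_eq_nil le_rfl]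
  | cons x xs ih =>
    intro k v
    have h2 : k + (((x :: xs).length : Nat) : Int) = (k + 1) + (xs.length : Int) := by
      simp only [List.length_cons]; push_cast; ring
    have h1 : k < (k + 1) + (xs.length : Int) := by omega
    rw [List.map_cons, PySem.List.enumerate_cons, h2, PySem.List.pyRange_one_cons h1,
      List.map_cons, ih (k + 1) v]

lemma pvB_ranges (l : List (List Int)) : ∀ (s c : Int),
    PySem.List.enumerate
      (((c :: pvOffs c (l.map (fun d => (d.length : Int)))).zip
          (pvOffs c (l.map (fun d => (d.length : Int))))).map
        (fun p => PySem.List.pyRange p.1 p.2 1)) s = pvTbl1 s c l := by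
  induction l with
  | nil => intro s c; simp [pvOffs, pvTbl1]
  | cons d rest ih =>
    intro s c
    simp only [List.map_cons, pvOffs, List.zip_cons_cons, PySem.List.enumerate_cons, pvTbl1]
    rw [ih (s + 1) (c + d.length)]

lemma pvB_flat (l : List (List Int)) : ∀ (s c : Int),
    PySem.List.enumerate ((pvTbl1 s c l).flatMap (fun p => p.2.map (fun _ => p.1))) c =
      pvTbl2 s c l := by
  induction l with
  | nil => intro s c; simp [pvTbl1, pvTbl2]
  | cons d rest ih =>
    intro s c
    simp only [pvTbl1, pvTbl2, List.flatMap_cons]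
    rw [PySem.List.enumerate_append, pvEnum_const]
    simp only [List.length_map, PySem.List.length_pyRange_one]
    have h3 : c + (((c + (d.length : Int) - c).toNat : Nat) : Int) = c + (d.length : Int) := by omega
    rw [h3, ih (s + 1) (c + (d.length : Int))]

lemma pvA_loop (l : List (List Int)) : ∀ (s cnt : Int)
    (d1 : PySem.Dict Int (List Int)) (d2 : PySem.Dict Int Int),
    (∀ k ∈ d1.keys, k < s) → (∀ k ∈ d2.keys, k < cnt) →
    ((PySem.List.enumerate l s).foldl pvStepA (d1, d2, cnt)).1.items = d1.items ++ pvTbl1 s cnt l ∧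
    ((PySem.List.enumerate l s).foldl pvStepA (d1, d2, cnt)).2.1.items = d2.items ++ pvTbl2 s cnt l := by
  induction l with
  | nil => intro s cnt d1 d2 _ _; simp [pvTbl1, pvTbl2]
  | cons d rest ih =>
    intro s cnt d1 d2 h1 h2
    rw [PySem.List.enumerate_cons, List.foldl_cons]
    set r := PySem.List.pyRange cnt (cnt + (d.length : Int)) 1 with hr
    have hstep : pvStepA (d1, d2, cnt) (s, d) =
        (d1.insert s r, r.foldl (fun d2 i => d2.insert i s) d2, cnt + (d.length : Int)) := rfl
    rw [hstep]
    -- contains s = false for d1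
    have hc1 : d1.contains s = false := by
      rw [PySem.Dict.contains_eq_decide_mem_keys]
      simp only [decide_eq_false_iff_not]
      intro hmem; exact absurd (h1 s hmem) (lt_irrefl s)
    have hitems1 : (d1.insert s r).items = d1.items ++ [(s, r)] :=
      PySem.Dict.items_insert_of_not_contains d1 r hc1
    -- the inner loop appends fresh keys
    have hfresh : ∀ a ∈ r, d2.contains a = false := by
      intro a ha
      rw [PySem.Dict.contains_eq_decide_mem_keys]
      simp only [decide_eq_false_iff_not]
      intro hmem
      have := h2 a hmem
      rw [hr, PySem.List.mem_pyRange_one] at ha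
      omega
    have hnd : (r.map (fun a => a)).Nodup := by
      simpa using (PySem.List.nodup_pyRange_one (a := cnt) (b := cnt + (d.length : Int)))
    have hitems2 : (r.foldl (fun d2 i => d2.insert i s) d2).items =
        d2.items ++ r.map (fun a => (a, s)) := by
      simpa using PySem.Dict.items_foldl_insert_fresh (l := r) (k := fun a => a)
        (v := fun _ => s) (d := d2) hfresh hnd
    -- key bounds for the recursive call
    have h1' : ∀ k ∈ (d1.insert s r).keys, k < s + 1 := by
      intro k hk
      rcases (PySem.Dict.mem_keys_insert d1 s k r).1 hk with h | h
      · omega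
      · exact lt_trans (h1 k h) (by omega)
    have h2' : ∀ k ∈ (r.foldl (fun d2 i => d2.insert i s) d2).keys, k < cnt + (d.length : Int) := by
      intro k hk
      simp only [PySem.Dict.keys, hitems2, List.map_append, List.mem_append, List.map_map] at hk
      rcases hk with h | h
      · have := h2 k h; omega
      · simp only [Function.comp_def, List.map_id'] at h
        have : k ∈ r := by simpa using h
        rw [hr, PySem.List.mem_pyRange_one] at this
        omega
    obtain ⟨e1, e2⟩ := ih (s + 1) (cnt + (d.length : Int))
      (d1.insert s r) (r.foldl (fun d2 i => d2.insert i s) d2) h1' h2'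
    refine ⟨?_, ?_⟩
    · rw [e1, hitems1, pvTbl1]; simp [hr]
    · rw [e2, hitems2, pvTbl2]; simp [hr]

lemma pvA_eq (dl : List (List Int)) : make_index_table dl = (pvTbl1 0 0 dl, pvTbl2 0 0 dl) := by
  obtain ⟨e1, e2⟩ := pvA_loop dl 0 0 PySem.Dict.empty PySem.Dict.empty
    (by simp [PySem.Dict.keys_empty]) (by simp [PySem.Dict.keys_empty])
  simp only [make_index_table]
  rw [e1, e2]
  have h : (PySem.Dict.empty : PySem.Dict Int (List Int)).items = [] := rfl
  have h2 : (PySem.Dict.empty : PySem.Dict Int Int).items = [] := rfl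
  simp [h, h2]

lemma pvB_eq (dl : List (List Int)) : make_index_table_alt dl = (pvTbl1 0 0 dl, pvTbl2 0 0 dl) := by
  simp only [make_index_table_alt]
  rw [pvB_offsets _ [0] 0 (by simp)]
  simp only [List.singleton_append]
  have hs : PySem.List.slice (0 :: pvOffs 0 (dl.map (fun d => (d.length : Int)))) (some 1) none =
      pvOffs 0 (dl.map (fun d => (d.length : Int))) := by
    rw [PySem.List.slice_from _ (show (0:Int) ≤ 1 by norm_num)]
    norm_num
  rw [hs, pvB_ranges dl 0 0, pvB_flat dl 0 0]

-- ===== VERDICT (by name: the statement is the Claim_ definition above) =====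
theorem make_index_table_spec : Claim_equal_make_index_table := by
  intro dl _
  unfold Spec_make_index_table
  rw [pvA_eq, pvB_eq]
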